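-- pv_equiv track=rewrite | github.com/jschnab/leetcode | arrays/k_divisible_elements.py | n_subarrays
-- ===== SOURCE A (Python) =====
-- def n_subarrays(A, k, p):
--     """
--     """
--     s = set()
--     for i in range(len(A)):
--         divisible = 0
--         L = [str(A[i])]
--         divisible += A[i] % p == 0
--         if divisible <= k:
--             s.add(",".join(L))
--         for j in range(i + 1, len(A)):
--             L.append(str(A[j]))
--             divisible += A[j] % p == 0
--             if divisible <= k:
--                 s.add(",".join(L))
--     return len(s)
-- ===== SOURCE B (Python) =====
-- def n_subarrays(A, k, p):
--     n = len(A)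
--     strs = [str(x) for x in A]
--     # prefix counts of p-divisible elements: pref[j] = #divisible in A[:j]
--     pref = [0]
--     for x in A:
--         pref.append(pref[-1] + (x % p == 0))
--     seen = set()
--     m = 0  # exclusive right edge of the qualifying window; never moves left
--     for i in range(n):
--         if m < i:
--             m = i
--         while m < n and pref[m + 1] - pref[i] <= k:
--             m += 1
--         if i < m:
--             cur = strs[i]
--             seen.add(cur)
--             for j in range(i + 2, m + 1):
--                 cur = cur + "," + strs[j - 1]
--                 seen.add(cur)
--     return len(seen)
-- ===== Notes on version B (the rewrite author's own statement) =====
-- stated objective: faster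
-- what changed: A restarts a divisibility counter, scans every end position and fully re-joins a growing string list for each start; B computes prefix divisibility counts once, slides a monotone two-pointer window so disqualified ends are never visited, and extends each subarray string incrementally from the previous one instead of re-joining it.
-- outside the precondition, e.g. on n_subarrays([1], 0, 0): A raises ZeroDivisionError, B raises ZeroDivisionError
import Mathlib
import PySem

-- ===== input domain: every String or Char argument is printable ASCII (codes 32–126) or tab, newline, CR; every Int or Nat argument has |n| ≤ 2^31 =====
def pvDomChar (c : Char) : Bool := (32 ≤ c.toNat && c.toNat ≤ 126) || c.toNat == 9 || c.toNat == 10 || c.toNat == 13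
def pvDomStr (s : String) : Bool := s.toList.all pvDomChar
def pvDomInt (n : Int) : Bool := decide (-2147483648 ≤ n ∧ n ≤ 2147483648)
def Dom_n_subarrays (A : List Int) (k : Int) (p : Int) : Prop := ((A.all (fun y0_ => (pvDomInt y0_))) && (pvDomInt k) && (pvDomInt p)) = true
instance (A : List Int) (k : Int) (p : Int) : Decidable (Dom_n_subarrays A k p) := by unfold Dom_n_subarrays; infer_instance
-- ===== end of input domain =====

-- B replaces A's per-start rescan (fresh divisible counter, full inner scan and a full re-join per subarray)
-- by one prefix-count pass, a monotone two-pointer window and incremental string extension; objective: faster.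


-- ===== PORT A =====
def n_subarrays (A : List Int) (k : Int) (p : Int) : Int :=
  let n : Int := A.length
  let s : PySem.Set String :=
    (PySem.List.pyRange 0 n 1).foldl (fun s i =>
      let ai := PySem.List.pyGetD A i 0
      let divisible : Int := 0 + (if PySem.Int.mod ai p = 0 then 1 else 0)
      let L : List String := [PySem.Int.toStr ai]
      let s1 := if divisible ≤ k then PySem.Set.add s (PySem.Str.join "," L) else s
      ((PySem.List.pyRange (i + 1) n 1).foldl
        (fun (st : PySem.Set String × Int × List String) j =>
          let aj := PySem.List.pyGetD A j 0
          let L' := st.2.2 ++ [PySem.Int.toStr aj]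
          let divisible' := st.2.1 + (if PySem.Int.mod aj p = 0 then 1 else 0)
          let s' := if divisible' ≤ k then PySem.Set.add st.1 (PySem.Str.join "," L') else st.1
          (s', divisible', L'))
        (s1, divisible, L)).1)
      PySem.Set.empty
  PySem.Set.len s

-- ===== PORT B =====
-- Source B's `while m < n and pref[m+1] - pref[i] <= k: m += 1`; the fuel only makes the loop total
def altAdvance (pref : List Int) (k pi n : Int) : Nat → Int → Int
  | 0, m => m
  | fuel + 1, m =>
    if m < n ∧ PySem.List.pyGetD pref (m + 1) 0 - pi ≤ k then
      altAdvance pref k pi n fuel (m + 1)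
    else m

def n_subarrays_alt (A : List Int) (k : Int) (p : Int) : Int :=
  let n : Int := A.length
  let strs : List String := A.map PySem.Int.toStr
  let pref : List Int :=
    A.foldl (fun pr x =>
      pr ++ [PySem.List.pyGetD pr (-1) 0 + (if PySem.Int.mod x p = 0 then 1 else 0)]) [0]
  let st : PySem.Set String × Int :=
    (PySem.List.pyRange 0 n 1).foldl (fun (st : PySem.Set String × Int) i =>
      let m0 := if st.2 < i then i else st.2
      let m := altAdvance pref k (PySem.List.pyGetD pref i 0) n n.toNat m0
      let seen :=
        if i < m then
          let cur := PySem.List.pyGetD strs i ""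
          ((PySem.List.pyRange (i + 2) (m + 1) 1).foldl
            (fun (q : PySem.Set String × String) j =>
              let cur' := q.2 ++ "," ++ PySem.List.pyGetD strs (j - 1) ""
              (PySem.Set.add q.1 cur', cur'))
            (PySem.Set.add st.1 cur, cur)).1
        else st.1
      (seen, m))
      (PySem.Set.empty, 0)
  PySem.Set.len st.1

-- ===== PRECONDITION & SPEC =====
-- Pre_ excludes only p = 0, where the Python A raises ZeroDivisionError on the first element.
def Pre_n_subarrays (A : List Int) (k : Int) (p : Int) : Prop := p ≠ 0
instance (A : List Int) (k : Int) (p : Int) : Decidable (Pre_n_subarrays A k p) := by unfold Pre_n_subarrays; infer_instance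
def pvWitness_n_subarrays : List Int × Int × Int := ([4, 2, 9], 1, 2)

def Spec_n_subarrays (A : List Int) (k : Int) (p : Int) (out : Int) : Prop := out = n_subarrays_alt A k p
instance (A : List Int) (k : Int) (p : Int) (out : Int) : Decidable (Spec_n_subarrays A k p out) := by unfold Spec_n_subarrays; infer_instance

-- ===== CLAIM (what is proved, stated in full; the proofs are below) =====
def Claim_equal_n_subarrays : Prop := ∀ (A : List Int) (k : Int) (p : Int), Dom_n_subarrays A k p → Pre_n_subarrays A k p → Spec_n_subarrays A k p (n_subarrays A k p)

-- ===== LEMMAS AND PROOFS =====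

-- "divisible by p" and the prefix divisibility count C j = #divisible among A[:j]
def pvD (p x : Int) : Bool := decide (PySem.Int.mod x p = 0)
def pvC (A : List Int) (p j : Int) : Int := ((A.take j.toNat).countP (pvD p) : Int)
-- the string both programs add for the subarray A[i:e]
def pvEnc (A : List Int) (i e : Int) : String :=
  PySem.Str.join "," ((PySem.List.slice A (some i) (some e)).map PySem.Int.toStr)
-- the qualifying end positions for start i
def pvEnds (A : List Int) (k p i : Int) : List Int :=
  (PySem.List.pyRange (i + 1) ((A.length : Int) + 1) 1).filter
    (fun e => decide (pvC A p e - pvC A p i ≤ k))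
-- the canonical computation both programs are reduced to
def pvCanon (A : List Int) (k p : Int) : PySem.Set String :=
  (PySem.List.pyRange 0 (A.length : Int) 1).foldl
    (fun s i => ((pvEnds A k p i).map (pvEnc A i)).foldl PySem.Set.add s) PySem.Set.empty

lemma pvC_mono (A : List Int) (p i j : Int) (h : i ≤ j) : pvC A p i ≤ pvC A p j := by
  unfold pvC
  have : A.take i.toNat = (A.take j.toNat).take i.toNat := by
    rw [List.take_take]; congr 1; omega
  rw [this]
  exact_mod_cast List.Sublist.countP_le (List.take_sublist _ _)

lemma pvC_succ (A : List Int) (p j : Int) (h0 : 0 ≤ j) (h1 : j < (A.length : Int)) :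
    pvC A p (j + 1) = pvC A p j + (if PySem.Int.mod (PySem.List.pyGetD A j 0) p = 0 then 1 else 0) := by
  unfold pvC
  have ht : (j + 1).toNat = j.toNat + 1 := by omega
  have hlt : j.toNat < A.length := by omega
  rw [ht, List.take_add_one, List.countP_append, PySem.List.pyGetD_eq_getElem A 0 h0 h1]
  simp [List.getElem?_eq_getElem hlt, List.countP_cons, pvD]

lemma pvSlice_self (A : List Int) (i : Int) (h0 : 0 ≤ i) :
    PySem.List.slice A (some i) (some i) = [] := by
  rw [PySem.List.slice_toNat A h0 h0]; simp

lemma pvSlice_snoc (A : List Int) (i j : Int) (h0 : 0 ≤ i) (hij : i ≤ j) (hj : j < (A.length : Int)) :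
    PySem.List.slice A (some i) (some (j + 1)) =
      PySem.List.slice A (some i) (some j) ++ [PySem.List.pyGetD A j 0] := by
  rw [PySem.List.slice_toNat A h0 (by omega), PySem.List.slice_toNat A h0 (by omega),
    PySem.List.pyGetD_eq_getElem A 0 (by omega) hj]
  have h1 : (j + 1).toNat - i.toNat = (j.toNat - i.toNat) + 1 := by omega
  have h2 : j.toNat - i.toNat < (A.drop i.toNat).length := by simp; omega
  rw [h1, List.take_add_one, List.getElem?_eq_getElem h2]
  simp only [List.getElem_drop]
  have hidx : i.toNat + (j.toNat - i.toNat) = j.toNat := by omega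
  simp [hidx]

-- the prefix list Source B builds, in closed form
lemma pvPref_fold (A : List Int) (p : Int) :
    A.foldl (fun pr x =>
      pr ++ [PySem.List.pyGetD pr (-1) 0 + (if PySem.Int.mod x p = 0 then 1 else 0)]) [0]
    = (List.range (A.length + 1)).map (fun u => ((A.take u).countP (pvD p) : Int)) := by
  induction A using List.reverseRecOn with
  | nil => simp
  | append_singleton B x ih =>
    rw [List.foldl_append, ih]
    simp only [List.foldl_cons, List.foldl_nil]
    have e1 : (List.range (B.length + 1)).map (fun u => ((B.take u).countP (pvD p) : Int))
        = (List.range B.length).map (fun u => ((B.take u).countP (pvD p) : Int))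
          ++ [((B.take B.length).countP (pvD p) : Int)] := by
      rw [List.range_succ, List.map_append]; simp
    rw [e1, PySem.List.pyGetD_neg_one_append_singleton, ← e1]
    rw [show (B ++ [x]).length = B.length + 1 from by simp, List.range_succ (n := B.length + 1),
      List.map_append]
    congr 1
    · apply List.map_congr_left
      intro u hu
      simp only [List.mem_range] at hu
      rw [List.take_append_of_le_length (by omega)]
    · simp only [List.map_cons, List.map_nil]
      have : (B ++ [x]).take (B.length + 1) = B ++ [x] := by
        apply List.take_of_length_le; simp
      rw [this, List.countP_append, List.take_length, List.countP_singleton]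
      push_cast
      simp only [pvD]
      split_ifs with h1 h2 h2 <;> simp_all

lemma pvPref_get (A : List Int) (p j : Int) (h0 : 0 ≤ j) (h1 : j ≤ (A.length : Int)) :
    PySem.List.pyGetD
      ((List.range (A.length + 1)).map (fun u => ((A.take u).countP (pvD p) : Int))) j 0
    = pvC A p j := by
  rw [PySem.List.pyGetD_of_nonneg _ _ h0,
    PySem.List.getD_map_range _ _ _ _ (by omega)]
  rfl

-- the while loop, characterised: it advances to a maximal qualifying window edge
lemma pvAdvance_spec (pref : List Int) (k pi n : Int) :
    ∀ (fuel : Nat) (m : Int), 0 ≤ m → m ≤ n → (n - m).toNat ≤ fuel →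
    m ≤ altAdvance pref k pi n fuel m ∧ altAdvance pref k pi n fuel m ≤ n ∧
    (∀ e, m ≤ e → e < altAdvance pref k pi n fuel m → PySem.List.pyGetD pref (e + 1) 0 - pi ≤ k) ∧
    (altAdvance pref k pi n fuel m < n →
      ¬ (PySem.List.pyGetD pref (altAdvance pref k pi n fuel m + 1) 0 - pi ≤ k)) := by
  intro fuel
  induction fuel with
  | zero =>
    intro m hm0 hmn hfuel
    simp only [altAdvance]
    refine ⟨le_refl _, hmn, ?_, ?_⟩
    · intro e he1 he2; omega
    · intro h; omega
  | succ fuel ih =>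
    intro m hm0 hmn hfuel
    by_cases hc : m < n ∧ PySem.List.pyGetD pref (m + 1) 0 - pi ≤ k
    · have hrec : altAdvance pref k pi n (fuel + 1) m = altAdvance pref k pi n fuel (m + 1) := by
        simp only [altAdvance, if_pos hc]
      obtain ⟨ih1, ih2, ih3, ih4⟩ := ih (m + 1) (by omega) (by omega) (by omega)
      rw [hrec]
      refine ⟨by omega, ih2, ?_, ih4⟩
      intro e he1 he2
      rcases eq_or_lt_of_le he1 with rfl | hlt
      · exact hc.2
      · exact ih3 e (by omega) he2
    · have hrec : altAdvance pref k pi n (fuel + 1) m = m := by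
        simp only [altAdvance, if_neg hc]
      rw [hrec]
      refine ⟨le_refl _, hmn, ?_, ?_⟩
      · intro e he1 he2; omega
      · intro h hk
        exact hc ⟨h, hk⟩

-- A's inner loop, characterised
lemma pvInnerA (A : List Int) (k p : Int) :
    ∀ (t : Nat) (i j : Int), 0 ≤ i → i < j → j ≤ (A.length : Int) → ((A.length : Int) - j).toNat = t →
    ∀ (s : PySem.Set String),
    (((PySem.List.pyRange j (A.length : Int) 1).foldl
        (fun (st : PySem.Set String × Int × List String) jj =>
          let aj := PySem.List.pyGetD A jj 0
          let L' := st.2.2 ++ [PySem.Int.toStr aj]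
          let divisible' := st.2.1 + (if PySem.Int.mod aj p = 0 then 1 else 0)
          let s' := if divisible' ≤ k then PySem.Set.add st.1 (PySem.Str.join "," L') else st.1
          (s', divisible', L'))
        (s, pvC A p j - pvC A p i, (PySem.List.slice A (some i) (some j)).map PySem.Int.toStr)).1)
      = ((((PySem.List.pyRange (j + 1) ((A.length : Int) + 1) 1).filter
            (fun e => decide (pvC A p e - pvC A p i ≤ k))).map (pvEnc A i)).foldl PySem.Set.add s) := by
  intro t
  induction t with
  | zero =>
    intro i j hi hij hjn ht s
    have hj : j = (A.length : Int) := by omega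
    subst hj
    rw [PySem.List.pyRange_one_eq_nil (le_refl _), PySem.List.pyRange_one_eq_nil (by omega)]
    simp
  | succ t ih =>
    intro i j hi hij hjn ht s
    have hjlt : j < (A.length : Int) := by omega
    rw [PySem.List.pyRange_one_cons hjlt, List.foldl_cons]
    have hL : (PySem.List.slice A (some i) (some j)).map PySem.Int.toStr ++ [PySem.Int.toStr (PySem.List.pyGetD A j 0)]
        = (PySem.List.slice A (some i) (some (j + 1))).map PySem.Int.toStr := by
      rw [pvSlice_snoc A i j hi (by omega) hjlt, List.map_append, List.map_cons, List.map_nil]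
    have hdiv : pvC A p j - pvC A p i + (if PySem.Int.mod (PySem.List.pyGetD A j 0) p = 0 then 1 else 0)
        = pvC A p (j + 1) - pvC A p i := by
      rw [pvC_succ A p j (by omega) hjlt]; ring
    simp only []
    rw [hL, hdiv]
    rw [ih i (j + 1) hi (by omega) (by omega) (by omega)]
    rw [PySem.List.pyRange_one_cons (by omega : j + 1 < (A.length : Int) + 1), List.filter_cons]
    by_cases hq : pvC A p (j + 1) - pvC A p i ≤ k
    · rw [if_pos hq, if_pos (show (decide (pvC A p (j + 1) - pvC A p i ≤ k)) = true by simpa using hq),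
        List.map_cons, List.foldl_cons]
      rfl
    · rw [if_neg hq, if_neg (show ¬ (decide (pvC A p (j + 1) - pvC A p i ≤ k)) = true by simpa using hq)]

-- A equals the canonical computation
lemma pvA_canon (A : List Int) (k p : Int) :
    n_subarrays A k p = PySem.Set.len (pvCanon A k p) := by
  unfold n_subarrays pvCanon
  simp only []
  congr 1
  apply PySem.List.foldl_congr_mem
  intro s i hi
  rw [PySem.List.mem_pyRange_one] at hi
  obtain ⟨hi0, hin⟩ := hi
  have hdiv : (0 : Int) + (if PySem.Int.mod (PySem.List.pyGetD A i 0) p = 0 then 1 else 0)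
      = pvC A p (i + 1) - pvC A p i := by
    rw [pvC_succ A p i hi0 hin]; ring
  have hL : [PySem.Int.toStr (PySem.List.pyGetD A i 0)]
      = (PySem.List.slice A (some i) (some (i + 1))).map PySem.Int.toStr := by
    rw [pvSlice_snoc A i i hi0 le_rfl hin, pvSlice_self A i hi0]; simp
  simp only [hdiv, hL]
  rw [pvInnerA A k p ((A.length : Int) - (i + 1)).toNat i (i + 1) hi0 (by omega) (by omega) rfl]
  unfold pvEnds
  rw [PySem.List.pyRange_one_cons (by omega : i + 1 < (A.length : Int) + 1), List.filter_cons]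
  by_cases hq : pvC A p (i + 1) - pvC A p i ≤ k
  · rw [if_pos hq, if_pos (show (decide (pvC A p (i + 1) - pvC A p i ≤ k)) = true by simpa using hq),
      List.map_cons, List.foldl_cons]
    rfl
  · rw [if_neg hq, if_neg (show ¬ (decide (pvC A p (i + 1) - pvC A p i ≤ k)) = true by simpa using hq)]


lemma pvCharsJoin_snoc (sep : List Char) (M : List (List Char)) (x : List Char) (h : M ≠ []) :
    PySem.Chars.join sep (M ++ [x]) = PySem.Chars.join sep M ++ sep ++ x := by
  induction M with
  | nil => exact absurd rfl h
  | cons a M ih =>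
    cases M with
    | nil => simp [PySem.Chars.join_singleton, PySem.Chars.join_cons_cons]
    | cons b M' =>
      rw [List.cons_append, List.cons_append, PySem.Chars.join_cons_cons,
        PySem.Chars.join_cons_cons, ← List.cons_append, ih (by simp)]
      simp [List.append_assoc]

lemma pvJoin_snoc (L : List String) (x : String) (h : L ≠ []) :
    PySem.Str.join "," (L ++ [x]) = PySem.Str.join "," L ++ "," ++ x := by
  apply String.toList_inj.mp
  simp only [String.toList_append, PySem.Str.toList_join, List.map_append, List.map_cons,
    List.map_nil]
  exact pvCharsJoin_snoc _ _ _ (by simpa using h)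

lemma pvJoin_single (x : String) : PySem.Str.join "," [x] = x := by
  apply String.toList_inj.mp
  simp only [PySem.Str.toList_join, List.map_cons, List.map_nil]
  exact PySem.Chars.join_singleton _ _

lemma pvStrs_get (A : List Int) (i : Int) (h0 : 0 ≤ i) (h1 : i < (A.length : Int)) :
    PySem.List.pyGetD (A.map PySem.Int.toStr) i "" = PySem.Int.toStr (PySem.List.pyGetD A i 0) := by
  rw [PySem.List.pyGetD_eq_getElem _ _ h0 (by simpa using h1),
    PySem.List.pyGetD_eq_getElem A 0 h0 h1]
  simp

lemma pvSlice_ne_nil (A : List Int) (i e : Int) (h0 : 0 ≤ i) (hie : i < e)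
    (he : e ≤ (A.length : Int)) : (PySem.List.slice A (some i) (some e)) ≠ [] := by
  rw [PySem.List.slice_toNat A h0 (by omega)]
  apply List.ne_nil_of_length_pos
  simp only [List.length_take, List.length_drop]
  omega

lemma pvEnc_succ (A : List Int) (i e : Int) (h0 : 0 ≤ i) (hie : i < e)
    (he : e < (A.length : Int)) :
    pvEnc A i (e + 1) = pvEnc A i e ++ "," ++ PySem.Int.toStr (PySem.List.pyGetD A e 0) := by
  unfold pvEnc
  rw [pvSlice_snoc A i e h0 (by omega) he, List.map_append, List.map_cons, List.map_nil,
    pvJoin_snoc]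
  simp only [ne_eq, List.map_eq_nil_iff]
  exact pvSlice_ne_nil A i e h0 hie (by omega)

-- B's incremental inner loop, characterised: cur always holds the last added subarray string
lemma pvInnerB (A : List Int) :
    ∀ (t : Nat) (i e m2 : Int), 0 ≤ i → i < e → e ≤ m2 → m2 ≤ (A.length : Int) →
    (m2 - e).toNat = t → ∀ (seen : PySem.Set String),
    (((PySem.List.pyRange (e + 1) (m2 + 1) 1).foldl
        (fun (q : PySem.Set String × String) j =>
          let cur' := q.2 ++ "," ++ PySem.List.pyGetD (A.map PySem.Int.toStr) (j - 1) ""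
          (PySem.Set.add q.1 cur', cur'))
        (PySem.Set.add seen (pvEnc A i e), pvEnc A i e)).1)
      = (PySem.List.pyRange e (m2 + 1) 1).foldl (fun s e' => PySem.Set.add s (pvEnc A i e')) seen := by
  intro t
  induction t with
  | zero =>
    intro i e m2 h0 hie hem hmn ht seen
    have : e = m2 := by omega
    subst this
    rw [PySem.List.pyRange_one_eq_nil (by omega), PySem.List.pyRange_one_cons (by omega),
      PySem.List.pyRange_one_eq_nil (by omega)]
    rfl
  | succ t ih =>
    intro i e m2 h0 hie hem hmn ht seen
    have hlt : e < m2 := by omega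
    rw [PySem.List.pyRange_one_cons (by omega : e + 1 < m2 + 1), List.foldl_cons]
    simp only []
    have hget : PySem.List.pyGetD (A.map PySem.Int.toStr) (e + 1 - 1) ""
        = PySem.Int.toStr (PySem.List.pyGetD A e 0) := by
      rw [show e + 1 - 1 = e from by ring, pvStrs_get A e (by omega) (by omega)]
    rw [hget, ← pvEnc_succ A i e h0 hie (by omega)]
    rw [ih i (e + 1) m2 h0 (by omega) (by omega) hmn (by omega)]
    rw [PySem.List.pyRange_one_cons (show e < m2 + 1 by omega), List.foldl_cons]

-- B's outer loop with the two-pointer invariant: everything left of the incoming window edge qualifies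
lemma pvOuterB (A : List Int) (k p : Int) :
    ∀ (t : Nat) (i : Int), 0 ≤ i → ((A.length : Int) - i).toNat = t →
    ∀ (seen : PySem.Set String) (m : Int), 0 ≤ m → m ≤ (A.length : Int) →
    (∀ e, i ≤ e → e < m → pvC A p (e + 1) - pvC A p i ≤ k) →
    ((PySem.List.pyRange i (A.length : Int) 1).foldl
      (fun (st : PySem.Set String × Int) i' =>
        let m0 := if st.2 < i' then i' else st.2
        let m' := altAdvance
          ((List.range (A.length + 1)).map (fun u => ((A.take u).countP (pvD p) : Int))) k
          (PySem.List.pyGetD ((List.range (A.length + 1)).map (fun u => ((A.take u).countP (pvD p) : Int))) i' 0)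
          (A.length : Int) A.length m0
        let seen' :=
          if i' < m' then
            let cur := PySem.List.pyGetD (A.map PySem.Int.toStr) i' ""
            ((PySem.List.pyRange (i' + 2) (m' + 1) 1).foldl
              (fun (q : PySem.Set String × String) j =>
                let cur' := q.2 ++ "," ++ PySem.List.pyGetD (A.map PySem.Int.toStr) (j - 1) ""
                (PySem.Set.add q.1 cur', cur'))
              (PySem.Set.add st.1 cur, cur)).1
          else st.1
        (seen', m'))
      (seen, m)).1
    = (PySem.List.pyRange i (A.length : Int) 1).foldl
        (fun s i' => ((pvEnds A k p i').map (pvEnc A i')).foldl PySem.Set.add s) seen := by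
  intro t
  induction t with
  | zero =>
    intro i hi0 ht seen m hm0 hmn hq
    rw [PySem.List.pyRange_one_eq_nil (by omega)]
    rfl
  | succ t ih =>
    intro i hi0 ht seen m hm0 hmn hq
    have hin : i < (A.length : Int) := by omega
    rw [PySem.List.pyRange_one_cons hin, List.foldl_cons, List.foldl_cons]
    simp only []
    set P := (List.range (A.length + 1)).map (fun u => ((A.take u).countP (pvD p) : Int)) with hP
    set m0 := if m < i then i else m with hm0def
    have hm0i : i ≤ m0 := by rw [hm0def]; split <;> omega
    have hm0n : m0 ≤ (A.length : Int) := by rw [hm0def]; split <;> omega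
    have hm00 : 0 ≤ m0 := by omega
    have hqm0 : ∀ e, i ≤ e → e < m0 → pvC A p (e + 1) - pvC A p i ≤ k := by
      intro e he1 he2
      rw [hm0def] at he2
      apply hq e he1
      by_cases h : m < i
      · rw [if_pos h] at he2; omega
      · rwa [if_neg h] at he2
    obtain ⟨ha1, ha2, ha3, ha4⟩ := pvAdvance_spec P k (PySem.List.pyGetD P i 0) (A.length : Int)
      A.length m0 hm00 hm0n (by omega)
    set m2 := altAdvance P k (PySem.List.pyGetD P i 0) (A.length : Int) A.length m0 with hm2
    have hPi : PySem.List.pyGetD P i 0 = pvC A p i := pvPref_get A p i hi0 (by omega)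
    have hqual : ∀ e, i ≤ e → e < m2 → pvC A p (e + 1) - pvC A p i ≤ k := by
      intro e he1 he2
      by_cases h : e < m0
      · exact hqm0 e he1 h
      · have := ha3 e (by omega) he2
        rwa [hPi, pvPref_get A p (e + 1) (by omega) (by omega)] at this
    have hmax : m2 < (A.length : Int) → ¬ (pvC A p (m2 + 1) - pvC A p i ≤ k) := by
      intro h
      have := ha4 h
      rwa [hPi, pvPref_get A p (m2 + 1) (by omega) (by omega)] at this
    -- the window range is exactly the list of qualifying ends
    have hends : PySem.List.pyRange (i + 1) (m2 + 1) 1 = pvEnds A k p i := by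
      unfold pvEnds
      rw [PySem.List.pyRange_one_append (i + 1) (m2 + 1) ((A.length : Int) + 1) (by omega) (by omega),
        List.filter_append]
      have h1 : (PySem.List.pyRange (i + 1) (m2 + 1) 1).filter
          (fun e => decide (pvC A p e - pvC A p i ≤ k)) = PySem.List.pyRange (i + 1) (m2 + 1) 1 := by
        apply List.filter_eq_self.mpr
        intro e he
        rw [PySem.List.mem_pyRange_one] at he
        have := hqual (e - 1) (by omega) (by omega)
        simp only [sub_add_cancel] at this
        simpa using this
      have h2 : (PySem.List.pyRange (m2 + 1) ((A.length : Int) + 1) 1).filter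
          (fun e => decide (pvC A p e - pvC A p i ≤ k)) = [] := by
        rw [List.filter_eq_nil_iff]
        intro e he
        rw [PySem.List.mem_pyRange_one] at he
        have hlt : m2 < (A.length : Int) := by omega
        have hmono := pvC_mono A p (m2 + 1) e (by omega)
        have := hmax hlt
        simp only [decide_eq_true_eq]
        omega
      rw [h1, h2, List.append_nil]
    -- the per-step computation is the canonical per-step fold
    have hstep : (if i < m2 then
            ((PySem.List.pyRange (i + 2) (m2 + 1) 1).foldl
              (fun (q : PySem.Set String × String) j =>
                let cur' := q.2 ++ "," ++ PySem.List.pyGetD (A.map PySem.Int.toStr) (j - 1) ""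
                (PySem.Set.add q.1 cur', cur'))
              (PySem.Set.add seen (PySem.List.pyGetD (A.map PySem.Int.toStr) i ""),
               PySem.List.pyGetD (A.map PySem.Int.toStr) i "")).1
          else seen)
        = ((pvEnds A k p i).map (pvEnc A i)).foldl PySem.Set.add seen := by
      rw [List.foldl_map, ← hends]
      by_cases him : i < m2
      · rw [if_pos him]
        have hcur : PySem.List.pyGetD (A.map PySem.Int.toStr) i "" = pvEnc A i (i + 1) := by
          rw [pvStrs_get A i hi0 hin]
          unfold pvEnc
          rw [pvSlice_snoc A i i hi0 le_rfl hin, pvSlice_self A i hi0, List.nil_append,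
            List.map_cons, List.map_nil, pvJoin_single]
        rw [hcur, show i + 2 = (i + 1) + 1 from by ring,
          pvInnerB A (m2 - (i + 1)).toNat i (i + 1) m2 hi0 (by omega) (by omega) ha2 rfl]
      · rw [if_neg him]
        have : m2 = i := by omega
        rw [this, PySem.List.pyRange_one_eq_nil (by omega)]
        rfl
    rw [hstep]
    exact ih (i + 1) (by omega) (by omega) _ m2 (by omega) ha2
      (fun e he1 he2 => by
        have h1 := hqual e (by omega) he2
        have h2 := pvC_mono A p i (i + 1) (by omega)
        omega)

-- B equals the canonical computation
lemma pvB_canon (A : List Int) (k p : Int) :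
    n_subarrays_alt A k p = PySem.Set.len (pvCanon A k p) := by
  unfold n_subarrays_alt pvCanon
  simp only []
  rw [pvPref_fold A p]
  congr 1
  rw [show ((A.length : Int)).toNat = A.length from by omega]
  exact pvOuterB A k p ((A.length : Int) - 0).toNat 0 le_rfl rfl PySem.Set.empty 0 le_rfl
    (by omega) (fun e he1 he2 => absurd he2 (by omega))

-- ===== VERDICT (by name: the statement is the Claim_ definition above) =====
theorem n_subarrays_spec : Claim_equal_n_subarrays := by
  intro A k p _ _
  unfold Spec_n_subarrays
  rw [pvA_canon, pvB_canon]
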